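-- pv_equiv track=rewrite | github.com/paulmurphynet/chronicle | chronicle/store/postgres_projection.py | _convert_qmark_to_pyformat
-- ===== SOURCE A (Python) =====
-- def _convert_qmark_to_pyformat(sql: str) -> str:
--     """Convert SQLite qmark placeholders to PostgreSQL pyformat placeholders."""
--     out: list[str] = []
--     in_single = False
--     in_double = False
--     in_line_comment = False
--     in_block_comment = False
--     i = 0
--     while i < len(sql):
--         ch = sql[i]
--         nxt = sql[i + 1] if i + 1 < len(sql) else ""
--         if in_line_comment:
--             out.append(ch)
--             if ch == "\n":
--                 in_line_comment = False
--             i += 1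
--             continue
--         if in_block_comment:
--             out.append(ch)
--             if ch == "*" and nxt == "/":
--                 out.append(nxt)
--                 i += 2
--                 in_block_comment = False
--                 continue
--             i += 1
--             continue
--         if not in_single and not in_double:
--             if ch == "-" and nxt == "-":
--                 out.append(ch)
--                 out.append(nxt)
--                 i += 2
--                 in_line_comment = True
--                 continue
--             if ch == "/" and nxt == "*":
--                 out.append(ch)
--                 out.append(nxt)
--                 i += 2
--                 in_block_comment = True
--                 continue
--         if ch == "'" and not in_double:
--             in_single = not in_single
--             out.append(ch)
--             i += 1
--             continue
--         if ch == '"' and not in_single: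
--             in_double = not in_double
--             out.append(ch)
--             i += 1
--             continue
--         if ch == "?" and not in_single and not in_double:
--             out.append("%s")
--             i += 1
--             continue
--         out.append(ch)
--         i += 1
--     return "".join(out)
-- ===== SOURCE B (Python) =====
-- def _convert_qmark_to_pyformat(sql: str) -> str:
--     """Convert SQLite qmark placeholders to PostgreSQL pyformat placeholders."""
--     out = []
--     i, n = 0, len(sql)
--     while i < n:
--         ch = sql[i]
--         if sql.startswith("--", i):
--             j = sql.find("\n", i + 2)
--             j = n if j < 0 else j + 1
--             out.append(sql[i:j]); i = j
--         elif sql.startswith("/*", i):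
--             j = sql.find("*/", i + 2)
--             j = n if j < 0 else j + 2
--             out.append(sql[i:j]); i = j
--         elif ch == "'" or ch == '"':
--             j = sql.find(ch, i + 1)
--             j = n if j < 0 else j + 1
--             out.append(sql[i:j]); i = j
--         elif ch == "?":
--             out.append("%s"); i += 1
--         else:
--             out.append(ch); i += 1
--     return "".join(out)
-- ===== Notes on version B (the rewrite author's own statement) =====
-- stated objective: idiomatic
-- what changed: Replaced the char-at-a-time loop with four boolean state flags by a tokenizing scan that, at each position, consumes a whole line comment, block comment or quoted string in one step (via str.find) or rewrites a bare question-mark placeholder, so no mode flags are carried between iterations.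
import Mathlib
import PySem

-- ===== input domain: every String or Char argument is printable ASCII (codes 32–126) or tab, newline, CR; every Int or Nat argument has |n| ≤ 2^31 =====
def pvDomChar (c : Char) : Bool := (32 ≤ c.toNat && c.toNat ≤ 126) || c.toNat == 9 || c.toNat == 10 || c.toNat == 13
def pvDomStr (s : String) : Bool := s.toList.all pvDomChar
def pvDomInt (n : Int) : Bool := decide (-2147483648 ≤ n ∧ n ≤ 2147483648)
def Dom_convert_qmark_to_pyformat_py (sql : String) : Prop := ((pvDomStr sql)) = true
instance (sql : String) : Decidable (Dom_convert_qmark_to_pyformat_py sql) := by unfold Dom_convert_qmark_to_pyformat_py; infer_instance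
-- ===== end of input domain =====

-- B replaces A's char-at-a-time five-flag state machine by a tokenizing scan that
-- consumes each comment/quoted-string run whole (idiomatic; same O(n) cost).

-- ===== PORT A =====
-- A's while-loop, transliterated as recursion over the remaining characters with the
-- same four boolean flags; `nxt` is the head of the rest (Python's sql[i+1] / "").
def pvLoopA : Bool → Bool → Bool → Bool → List Char → List Char
  | _, _, _, _, [] => []
  | sing, doub, line, blk, ch :: rest =>
    if line then
      if ch = '\n' then ch :: pvLoopA sing doub false blk rest
      else ch :: pvLoopA sing doub line blk rest
    else if blk then
      if ch = '*' && rest.head? = some '/' then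
        ch :: '/' :: pvLoopA sing doub line false rest.tail
      else ch :: pvLoopA sing doub line blk rest
    else if (!sing && !doub) && ch = '-' && rest.head? = some '-' then
      ch :: '-' :: pvLoopA sing doub true blk rest.tail
    else if (!sing && !doub) && ch = '/' && rest.head? = some '*' then
      ch :: '*' :: pvLoopA sing doub line true rest.tail
    else if ch = '\'' && !doub then
      ch :: pvLoopA (!sing) doub line blk rest
    else if ch = '"' && !sing then
      ch :: pvLoopA sing (!doub) line blk rest
    else if ch = '?' && !sing && !doub then
      '%' :: 's' :: pvLoopA sing doub line blk rest
    else ch :: pvLoopA sing doub line blk rest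
  termination_by _ _ _ _ l => l.length
  decreasing_by all_goals simp [List.length_tail] <;> omega

def convert_qmark_to_pyformat_py (sql : String) : String :=
  String.ofList (pvLoopA false false false false sql.toList)

-- ===== PORT B =====
-- sql.find(q, i+1): copy through the first occurrence of q (or everything).
def pvSpanThrough (q : Char) : List Char → List Char × List Char
  | [] => ([], [])
  | c :: r =>
    if c = q then ([c], r)
    else
      let p := pvSpanThrough q r
      (c :: p.1, p.2)

-- sql.find("*/", i+2): copy through the first "*/" (or everything).
def pvSplitBlock : List Char → List Char × List Char
  | '*' :: '/' :: r => (['*', '/'], r)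
  | c :: r =>
    let p := pvSplitBlock r
    (c :: p.1, p.2)
  | [] => ([], [])

theorem pvSpanThrough_snd_le (q : Char) : ∀ l : List Char, (pvSpanThrough q l).2.length ≤ l.length := by
  intro l
  induction l with
  | nil => simp [pvSpanThrough]
  | cons c r ih =>
    by_cases h : c = q <;> simp [pvSpanThrough, h] <;> omega

theorem pvSplitBlock_snd_le : ∀ l : List Char, (pvSplitBlock l).2.length ≤ l.length := by
  intro l
  induction l using pvSplitBlock.induct with
  | case1 r => simp [pvSplitBlock]; omega
  | case2 c r h ih => rw [pvSplitBlock.eq_def]; cases r <;> simp_all <;> omega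
  | case3 => simp [pvSplitBlock]


def pvScanB : List Char → List Char
  | [] => []
  | '-' :: '-' :: r =>
    '-' :: '-' :: ((pvSpanThrough '\n' r).1 ++ pvScanB (pvSpanThrough '\n' r).2)
  | '/' :: '*' :: r =>
    '/' :: '*' :: ((pvSplitBlock r).1 ++ pvScanB (pvSplitBlock r).2)
  | '\'' :: r =>
    '\'' :: ((pvSpanThrough '\'' r).1 ++ pvScanB (pvSpanThrough '\'' r).2)
  | '"' :: r =>
    '"' :: ((pvSpanThrough '"' r).1 ++ pvScanB (pvSpanThrough '"' r).2)
  | '?' :: r => '%' :: 's' :: pvScanB r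
  | c :: r => c :: pvScanB r
  termination_by l => l.length
  decreasing_by
    all_goals simp
    all_goals first
      | (have := pvSpanThrough_snd_le '\n' r; omega)
      | (have := pvSplitBlock_snd_le r; omega)
      | (have := pvSpanThrough_snd_le '\'' r; omega)
      | (have := pvSpanThrough_snd_le '"' r; omega)
      | omega

def convert_qmark_to_pyformat_py_alt (sql : String) : String :=
  String.ofList (pvScanB sql.toList)

-- ===== PRECONDITION & SPEC =====
def Spec_convert_qmark_to_pyformat_py (sql : String) (out : String) : Prop := out = convert_qmark_to_pyformat_py_alt sql
instance (sql : String) (out : String) : Decidable (Spec_convert_qmark_to_pyformat_py sql out) := by unfold Spec_convert_qmark_to_pyformat_py; infer_instance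

-- ===== CLAIM (what is proved, stated in full; the proofs are below) =====
def Claim_equal_convert_qmark_to_pyformat_py : Prop := ∀ (sql : String), Dom_convert_qmark_to_pyformat_py sql → Spec_convert_qmark_to_pyformat_py sql (convert_qmark_to_pyformat_py sql)

-- ===== LEMMAS AND PROOFS =====

-- In the line-comment state A copies through the first newline, then returns to the main state.
theorem pvLoopA_line : ∀ l : List Char,
    pvLoopA false false true false l
      = (pvSpanThrough '\n' l).1 ++ pvLoopA false false false false (pvSpanThrough '\n' l).2 := by
  intro l
  induction l with
  | nil => simp [pvLoopA, pvSpanThrough]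
  | cons c r ih =>
    by_cases h : c = '\n' <;> simp [pvLoopA, pvSpanThrough, h, ih]

-- In the block-comment state A copies through the first "*/", then returns to the main state.
theorem pvLoopA_block : ∀ l : List Char,
    pvLoopA false false false true l
      = (pvSplitBlock l).1 ++ pvLoopA false false false false (pvSplitBlock l).2 := by
  intro l
  induction l using pvSplitBlock.induct with
  | case1 r => simp [pvLoopA, pvSplitBlock]
  | case2 c r h ih =>
    rw [pvSplitBlock.eq_def]
    by_cases hc : c = '*'
    · subst hc
      cases r with
      | nil => simp_all [pvLoopA]
      | cons d r2 =>
        have hd : d ≠ '/' := fun hd => h r2 rfl (by rw [hd])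
        simp_all [pvLoopA]
    · cases r <;> simp_all [pvLoopA]
  | case3 => simp [pvLoopA, pvSplitBlock]

-- Inside a single-quoted string A copies through the closing quote, then returns to the main state.
theorem pvLoopA_single : ∀ l : List Char,
    pvLoopA true false false false l
      = (pvSpanThrough '\'' l).1 ++ pvLoopA false false false false (pvSpanThrough '\'' l).2 := by
  intro l
  induction l with
  | nil => simp [pvLoopA, pvSpanThrough]
  | cons c r ih =>
    by_cases h : c = '\'' <;> simp [pvLoopA, pvSpanThrough, h, ih]

-- Inside a double-quoted string A copies through the closing quote, then returns to the main state.
theorem pvLoopA_double : ∀ l : List Char,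
    pvLoopA false true false false l
      = (pvSpanThrough '"' l).1 ++ pvLoopA false false false false (pvSpanThrough '"' l).2 := by
  intro l
  induction l with
  | nil => simp [pvLoopA, pvSpanThrough]
  | cons c r ih =>
    by_cases h : c = '"' <;> simp [pvLoopA, pvSpanThrough, h, ih]

-- In the main state A's state machine and B's tokenizer produce the same output.
theorem pvLoopA_eq_scanB : ∀ l : List Char, pvLoopA false false false false l = pvScanB l := by
  intro l
  induction l using pvScanB.induct with
  | case1 => simp [pvLoopA, pvScanB]
  | case2 r ih => simp [pvLoopA, pvScanB, pvLoopA_line, ih]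
  | case3 r ih => simp [pvLoopA, pvScanB, pvLoopA_block, ih]
  | case4 r ih => simp_all [pvLoopA, pvScanB, pvLoopA_single]
  | case5 r ih => simp_all [pvLoopA, pvScanB, pvLoopA_double]
  | case6 r ih => simp_all [pvLoopA, pvScanB]
  | case7 c r h1 h2 h3 h4 h5 ih =>
    have hd : ¬(c = '-' ∧ r.head? = some '-') := by
      rintro ⟨rfl, hh⟩
      cases r with
      | nil => simp at hh
      | cons d r2 => simp at hh; exact h1 r2 rfl (by rw [hh])
    have hb : ¬(c = '/' ∧ r.head? = some '*') := by
      rintro ⟨rfl, hh⟩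
      cases r with
      | nil => simp at hh
      | cons d r2 => simp at hh; exact h2 r2 rfl (by rw [hh])
    have hs : pvScanB (c :: r) = c :: pvScanB r := by
      rw [pvScanB.eq_def]
      split <;> simp_all
    rw [pvLoopA.eq_def, hs]
    simp [hd, hb]
    rw [if_neg h3, if_neg h4, if_neg h5, ih]

-- ===== VERDICT (by name: the statement is the Claim_ definition above) =====
theorem convert_qmark_to_pyformat_py_spec : Claim_equal_convert_qmark_to_pyformat_py := by
  intro sql _
  unfold Spec_convert_qmark_to_pyformat_py convert_qmark_to_pyformat_py convert_qmark_to_pyformat_py_alt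
  rw [pvLoopA_eq_scanB]
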